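-- pv_equiv track=rewrite | github.com/wileyalanjones/American_to_Canadian_English | app.py | replace_by_base
-- ===== SOURCE A (Python) =====
-- BASE_REPLACEMENTS = {
--     "color": "colour",
--     "honor": "honour",
--     "labor": "labour",
--     "favor": "favour",
--     "neighbor": "neighbour",
--     "behavior": "behaviour",
--     "center": "centre",
--     "theater": "theatre",
--     "catalog": "catalogue",
--     "dialog": "dialogue",
--     "defense": "defence",
--     "offense": "offence",
-- }
--
-- def preserve_case(original: str, replacement: str) -> str:
--     if original.isupper():
--         return replacement.upper()
--     if original.istitle():
--         return replacement.title()
--     return replacement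
--
-- def replace_by_base(word: str) -> str | None:
--     lower = word.lower()
--
--     for base, replacement in sorted(BASE_REPLACEMENTS.items(), key=lambda x: len(x[0]), reverse=True):
--         if lower.startswith(base) and lower != base:
--             suffix = lower[len(base):]
--             new_word = replacement + suffix
--             return preserve_case(word, new_word)
--
--     return None
-- ===== SOURCE B (Python) =====
-- BASES = frozenset([
--     "color", "honor", "labor", "favor", "neighbor", "behavior",
--     "center", "theater", "catalog", "dialog", "defense", "offense",
-- ])
--
--
-- def _canadianize(base):
--     # Every British form is derived from its base by a suffix rule.
--     if base.endswith("or"):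
--         return base[:-1] + "ur"
--     if base.endswith("er"):
--         return base[:-2] + "re"
--     if base.endswith("se"):
--         return base[:-2] + "ce"
--     return base + "ue"  # the "-og" bases
--
--
-- _MAXLEN = max(map(len, BASES))
--
--
-- def replace_by_base(word):
--     lower = word.lower()
--     pre, rest = "", lower
--     while rest and len(pre) < _MAXLEN:
--         pre, rest = pre + rest[0], rest[1:]
--         if rest and pre in BASES:
--             new_word = _canadianize(pre) + rest
--             if word.isupper():
--                 return new_word.upper()
--             if word.istitle():
--                 return new_word.title()
--             return new_word
--     return None
-- ===== Notes on version B (the rewrite author's own statement) =====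
-- stated objective: alternative
-- what changed: B keeps only the 12 bases and derives each British replacement by a suffix rule (-or/-er/-se/-og) instead of storing a base->replacement dict, and finds the match by growing the prefix of the lowered word one character at a time (capped at the longest base length) with a set-membership test instead of A's length-sorted scan of the dict entries with startswith; since no base is a prefix of another, at most one prefix matches, so the changed traversal is invisible.
import Mathlib
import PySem

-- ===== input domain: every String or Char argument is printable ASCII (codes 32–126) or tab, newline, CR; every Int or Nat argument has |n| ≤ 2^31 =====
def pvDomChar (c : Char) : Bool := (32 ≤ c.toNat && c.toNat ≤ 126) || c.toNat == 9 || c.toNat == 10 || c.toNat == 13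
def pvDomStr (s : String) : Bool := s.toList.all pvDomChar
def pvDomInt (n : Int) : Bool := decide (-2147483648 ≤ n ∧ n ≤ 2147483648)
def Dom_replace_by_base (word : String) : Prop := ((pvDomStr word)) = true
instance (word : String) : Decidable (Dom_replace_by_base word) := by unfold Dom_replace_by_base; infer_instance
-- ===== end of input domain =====

-- B stores only the 12 bases and derives each replacement by a suffix rule, finding the match by
-- growing the prefix of the lowered word one char at a time instead of A's length-sorted dict scan
-- (objective: alternative).

-- ===== PORT A =====
-- BASE_REPLACEMENTS of Source A
def basePairs : List (List Char × List Char) := [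
  ("color".toList, "colour".toList),
  ("honor".toList, "honour".toList),
  ("labor".toList, "labour".toList),
  ("favor".toList, "favour".toList),
  ("neighbor".toList, "neighbour".toList),
  ("behavior".toList, "behaviour".toList),
  ("center".toList, "centre".toList),
  ("theater".toList, "theatre".toList),
  ("catalog".toList, "catalogue".toList),
  ("dialog".toList, "dialogue".toList),
  ("defense".toList, "defence".toList),
  ("offense".toList, "offence".toList)]

-- str.isupper(): at least one cased character and no lowercase one (exact on ASCII, where cased = alpha)
def strIsupper (s : List Char) : Bool :=
  s.any (fun c => PySem.Chars.isalpha c) && s.all (fun c => !PySem.Chars.islower c)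

-- str.istitle(): uppercase only after uncased, lowercase only after cased, at least one cased (exact on ASCII)
def istitleGo : List Char → Bool → Bool → Bool
  | [], _, seen => seen
  | c :: rest, prevCased, seen =>
    if PySem.Chars.isupper c then !prevCased && istitleGo rest true true
    else if PySem.Chars.islower c then prevCased && istitleGo rest true true
    else istitleGo rest false seen

def strIstitle (s : List Char) : Bool := istitleGo s false false

-- str.title(): uppercase a letter after a non-letter, lowercase a letter after a letter (exact on ASCII)
def titleGo : List Char → Bool → List Char
  | [], _ => []
  | c :: rest, prevCased =>
    if PySem.Chars.isalpha c then
      (if prevCased then PySem.Chars.lowerChar c else PySem.Chars.upperChar c) :: titleGo rest true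
    else c :: titleGo rest false

-- preserve_case of Source A
def preserveCase (original replacement : List Char) : List Char :=
  if strIsupper original then PySem.Chars.upper replacement
  else if strIstitle original then titleGo replacement false
  else replacement

-- the for loop over sorted(BASE_REPLACEMENTS.items(), key=len of base, reverse=True)
def loopA (word : String) (lower : List Char) : List (List Char × List Char) → Option String
  | [] => none
  | (base, repl) :: rest =>
    if PySem.Chars.startswith lower base && !(lower == base) then
      some (String.ofList (preserveCase word.toList (repl ++ lower.drop base.length)))
    else loopA word lower rest

def replace_by_base (word : String) : Option String :=
  let lower := PySem.Chars.lower word.toList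
  loopA word lower (PySem.List.sorted basePairs (fun x => x.1.length) true)

-- ===== PORT B =====
-- BASES of Source B (a frozenset of the 12 base spellings; membership only)
def basesB : List (List Char) := [
  "color".toList, "honor".toList, "labor".toList, "favor".toList,
  "neighbor".toList, "behavior".toList, "center".toList, "theater".toList,
  "catalog".toList, "dialog".toList, "defense".toList, "offense".toList]

-- _canadianize of Source B: derive the British form from the base by a suffix rule
def canadianize (b : List Char) : List Char :=
  if PySem.Chars.endswith b "or".toList then b.dropLast ++ "ur".toList
  else if PySem.Chars.endswith b "er".toList then b.take (b.length - 2) ++ "re".toList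
  else if PySem.Chars.endswith b "se".toList then b.take (b.length - 2) ++ "ce".toList
  else b ++ "ue".toList

-- word.isupper(), written as B uses it (exact on ASCII)
def isupperB (s : List Char) : Bool :=
  s.all (fun c => !PySem.Chars.islower c) && s.any (fun c => PySem.Chars.isalpha c)

-- word.istitle() as a single fold; state = (prevCased, seenCased, stillValid) (exact on ASCII)
def istitleStep (st : Bool × Bool × Bool) (c : Char) : Bool × Bool × Bool :=
  if PySem.Chars.isupper c then (true, true, st.2.2 && !st.1)
  else if PySem.Chars.islower c then (true, true, st.2.2 && st.1)
  else (false, st.2.1, st.2.2)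

def istitleB (s : List Char) : Bool :=
  ((s.foldl istitleStep (false, false, true)).2.1) && ((s.foldl istitleStep (false, false, true)).2.2)

-- str.title() as a fold building the result back-to-front (exact on ASCII)
def titleStep (st : List Char × Bool) (c : Char) : List Char × Bool :=
  if PySem.Chars.isalpha c then
    ((if st.2 then PySem.Chars.lowerChar c else PySem.Chars.upperChar c) :: st.1, true)
  else (c :: st.1, false)

def titleB (s : List Char) : List Char :=
  ((s.foldl titleStep ([], false)).1).reverse

-- _MAXLEN of Source B: no base is longer, so the scan stops there
def maxLenB : Nat := (basesB.map List.length).foldl max 0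

-- the while loop of Source B: shift one char from rest onto pre, test membership of the proper prefix
def loopB (w : String) (pre : List Char) : List Char → Option String
  | [] => none
  | c :: rest =>
    if ¬ (pre.length < maxLenB) then none
    else if rest.isEmpty then none
    else if basesB.contains (pre ++ [c]) then
      if isupperB w.toList then some (String.ofList (PySem.Chars.upper (canadianize (pre ++ [c]) ++ rest)))
      else if istitleB w.toList then some (String.ofList (titleB (canadianize (pre ++ [c]) ++ rest)))
      else some (String.ofList (canadianize (pre ++ [c]) ++ rest))
    else loopB w (pre ++ [c]) rest

def replace_by_base_alt (word : String) : Option String :=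
  loopB word [] (PySem.Chars.lower word.toList)

-- ===== PRECONDITION & SPEC =====
def Spec_replace_by_base (word : String) (out : Option String) : Prop := out = replace_by_base_alt word
instance (word : String) (out : Option String) : Decidable (Spec_replace_by_base word out) := by unfold Spec_replace_by_base; infer_instance

-- ===== CLAIM (what is proved, stated in full; the proofs are below) =====
def Claim_equal_replace_by_base : Prop := ∀ (word : String), Dom_replace_by_base word → Spec_replace_by_base word (replace_by_base word)

-- ===== LEMMAS AND PROOFS =====

-- no base of basePairs is a proper prefix of another base
lemma basePairs_nonprefix : ∀ p ∈ basePairs, ∀ q ∈ basePairs, p.1 <+: q.1 → p = q := by decide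

lemma basePairs_len_pos : ∀ p ∈ basePairs, 1 ≤ p.1.length := by decide

lemma basePairs_len_le : ∀ p ∈ basePairs, p.1.length ≤ maxLenB := by decide

-- B's bases are exactly A's keys
lemma basesB_eq : basesB = basePairs.map Prod.fst := by decide

-- B's suffix rule reproduces A's stored replacement on every base
lemma canadianize_eq : ∀ p ∈ basePairs, canadianize p.1 = p.2 := by decide

-- at most one base is a prefix of a given list
lemma base_prefix_uniq (L b r : List Char) (hmem : (b, r) ∈ basePairs) (hp : b <+: L) :
    ∀ p ∈ basePairs, p.1 <+: L → p = (b, r) := by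
  intro p hpmem hpp
  rcases le_total p.1.length b.length with hle | hle
  · exact basePairs_nonprefix p hpmem (b, r) hmem (List.prefix_of_prefix_length_le hpp hp hle)
  · exact (basePairs_nonprefix (b, r) hmem p hpmem (List.prefix_of_prefix_length_le hp hpp hle)).symm

-- A's guard 'lower != base' equals 'len(base) < len(lower)' for a prefix
lemma guard_iff (b L : List Char) (hp : b <+: L) : L ≠ b ↔ b.length < L.length := by
  constructor
  · intro hne
    rcases lt_or_eq_of_le hp.length_le with h | h
    · exact h
    · exact absurd (List.IsPrefix.eq_of_length hp h).symm hne
  · intro hlt heq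
    exact absurd (congrArg List.length heq) (by omega)

lemma loopA_eq_none (w : String) (L : List Char) (l : List (List Char × List Char))
    (h : ∀ p ∈ l, ¬(p.1 <+: L ∧ L ≠ p.1)) : loopA w L l = none := by
  induction l with
  | nil => rfl
  | cons p rest ih =>
    obtain ⟨b, r⟩ := p
    have hb := h (b, r) List.mem_cons_self
    rw [loopA, if_neg, ih (fun q hq => h q (List.mem_cons_of_mem _ hq))]
    simp only [Bool.and_eq_true, Bool.not_eq_true', beq_eq_false_iff_ne, PySem.Chars.startswith_iff]
    exact fun hc => hb ⟨hc.1, hc.2⟩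

lemma loopA_eq_some (w : String) (L : List Char) (l : List (List Char × List Char))
    (b r : List Char) (hmem : (b, r) ∈ l) (hcond : b <+: L ∧ L ≠ b)
    (huniq : ∀ p ∈ l, p.1 <+: L → p = (b, r)) :
    loopA w L l = some (String.ofList (preserveCase w.toList (r ++ L.drop b.length))) := by
  induction l with
  | nil => cases hmem
  | cons p rest ih =>
    obtain ⟨b', r'⟩ := p
    by_cases hc : b' <+: L ∧ L ≠ b'
    · have heq : ((b', r') : List Char × List Char) = (b, r) :=
        huniq (b', r') List.mem_cons_self hc.1
      rw [loopA, if_pos]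
      · simp only [Prod.mk.injEq] at heq
        rw [heq.1, heq.2]
      · simp only [Bool.and_eq_true, Bool.not_eq_true', beq_eq_false_iff_ne,
          PySem.Chars.startswith_iff]
        exact ⟨hc.1, hc.2⟩
    · rw [loopA, if_neg]
      · refine ih ?_ (fun q hq => huniq q (List.mem_cons_of_mem _ hq))
        rcases List.mem_cons.mp hmem with h | h
        · cases h; exact absurd hcond hc
        · exact h
      · simp only [Bool.and_eq_true, Bool.not_eq_true', beq_eq_false_iff_ne,
          PySem.Chars.startswith_iff]
        exact fun h => hc ⟨h.1, h.2⟩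

-- B's isupper equals A's
lemma isupperB_eq (s : List Char) : isupperB s = strIsupper s := by
  simp [isupperB, strIsupper, Bool.and_comm]

-- once stillValid is false it stays false through the fold
lemma istitle_fold_false (s : List Char) : ∀ prev seen,
    (s.foldl istitleStep (prev, seen, false)).2.2 = false := by
  induction s with
  | nil => intro prev seen; rfl
  | cons c rest ih =>
    intro prev seen
    simp only [List.foldl_cons, istitleStep]
    split_ifs <;> simp [ih]

-- the fold with stillValid = true computes istitleGo
lemma istitle_fold_go (s : List Char) : ∀ prev seen,
    ((s.foldl istitleStep (prev, seen, true)).2.1 && (s.foldl istitleStep (prev, seen, true)).2.2)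
      = istitleGo s prev seen := by
  induction s with
  | nil => intro prev seen; simp [istitleGo]
  | cons c rest ih =>
    intro prev seen
    simp only [List.foldl_cons, istitleStep, istitleGo]
    split_ifs with h1 h2
    · cases prev
      · simpa using ih true true
      · simp [istitle_fold_false]
    · cases prev
      · simp [istitle_fold_false]
      · simpa using ih true true
    · exact ih false seen

lemma istitleB_eq (s : List Char) : istitleB s = strIstitle s := by
  simpa [istitleB, strIstitle] using istitle_fold_go s false false

-- the title fold appends titleGo onto the reversed accumulator
lemma title_fold (s : List Char) : ∀ acc prev,
    ((s.foldl titleStep (acc, prev)).1).reverse = acc.reverse ++ titleGo s prev := by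
  induction s with
  | nil => intro acc prev; simp [titleGo]
  | cons c rest ih =>
    intro acc prev
    simp only [List.foldl_cons, titleStep, titleGo]
    split_ifs <;> simp [ih]

lemma titleB_eq (s : List Char) : titleB s = titleGo s false := by
  simpa [titleB] using title_fold s [] false

-- B's inline case dispatch equals A's preserve_case
lemma caseB_eq (w : String) (x : List Char) :
    (if isupperB w.toList then some (String.ofList (PySem.Chars.upper x))
     else if istitleB w.toList then some (String.ofList (titleB x))
     else some (String.ofList x)) = some (String.ofList (preserveCase w.toList x)) := by
  rw [isupperB_eq, istitleB_eq, titleB_eq, preserveCase]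
  split_ifs <;> rfl

lemma loopB_eq_none (w : String) (L : List Char)
    (h : ∀ p ∈ basePairs, ¬(p.1 <+: L ∧ p.1.length < L.length)) :
    ∀ rest pre, pre ++ rest = L → loopB w pre rest = none := by
  intro rest
  induction rest with
  | nil => intro pre _; rfl
  | cons c rest' ih =>
    intro pre hpre
    rw [loopB]
    by_cases hm : pre.length < maxLenB
    swap
    · rw [if_pos hm]
    rw [if_neg (not_not_intro hm)]
    by_cases he : rest' = []
    · simp [he]
    · rw [if_neg (by simpa [List.isEmpty_iff] using he)]
      have hcont : basesB.contains (pre ++ [c]) = false := by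
        by_contra hc
        have hmem : (pre ++ [c]) ∈ basesB := by
          simpa [List.contains_eq_mem] using (Bool.not_eq_false _).mp hc
        rw [basesB_eq, List.mem_map] at hmem
        obtain ⟨p, hp, hfst⟩ := hmem
        refine h p hp ⟨?_, ?_⟩
        · rw [hfst]; exact ⟨rest', by simpa using hpre⟩
        · have : (pre ++ [c]).length + rest'.length = L.length := by
            rw [← hpre]; simp; omega
          rw [hfst]
          have : rest'.length ≥ 1 := by
            cases rest' with | nil => exact absurd rfl he | cons _ _ => simp
          omega
      rw [hcont]
      simp only [Bool.false_eq_true, if_false]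
      exact ih (pre ++ [c]) (by simpa using hpre)

lemma loopB_eq_some (w : String) (L b r : List Char) (hmem : (b, r) ∈ basePairs)
    (hp : b <+: L) (hlt : b.length < L.length)
    (huniq : ∀ p ∈ basePairs, p.1 <+: L → p = (b, r)) :
    ∀ rest pre, pre ++ rest = L → pre.length < b.length →
      loopB w pre rest = some (String.ofList (preserveCase w.toList (r ++ L.drop b.length))) := by
  intro rest
  induction rest with
  | nil =>
    intro pre hpre hlen
    exfalso
    have hpl : pre = L := by simpa using hpre
    rw [hpl] at hlen
    omega
  | cons c rest' ih =>
    intro pre hpre hlen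
    have hlenL : pre.length + 1 + rest'.length = L.length := by
      rw [← hpre]; simp; omega
    have hne : rest' ≠ [] := by
      intro he
      subst he
      simp at hlenL
      omega
    rw [loopB,
      if_neg (not_not_intro (lt_of_lt_of_le hlen (basePairs_len_le (b, r) hmem))),
      if_neg (by simpa [List.isEmpty_iff] using hne)]
    have hprefix : (pre ++ [c]) <+: L := ⟨rest', by simpa using hpre⟩
    by_cases hb : pre.length + 1 = b.length
    · -- the tested prefix IS the base
      have hpc : pre ++ [c] = b := by
        have h1 : (pre ++ [c]).length = b.length := by simp [hb]
        rcases le_total (pre ++ [c]).length b.length with hle | hle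
        · exact (List.prefix_of_prefix_length_le hprefix hp hle).eq_of_length h1
        · exact ((List.prefix_of_prefix_length_le hp hprefix hle).eq_of_length h1.symm).symm
      have hcont : basesB.contains (pre ++ [c]) = true := by
        rw [hpc, basesB_eq, List.contains_eq_mem]
        simp only [decide_eq_true_eq, List.mem_map]
        exact ⟨(b, r), hmem, rfl⟩
      rw [hcont]
      have hdrop : rest' = L.drop b.length := by
        have : (pre ++ [c]) ++ rest' = L := by simpa using hpre
        rw [← this, List.drop_append_of_le_length (by simp [hb])]
        simp [hb]
      rw [if_pos rfl, hpc, canadianize_eq (b, r) hmem, hdrop]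
      exact caseB_eq w _
    · -- the tested prefix is shorter than the base: not a member
      have hcont : basesB.contains (pre ++ [c]) = false := by
        by_contra hc
        have hmem' : (pre ++ [c]) ∈ basesB := by
          simpa [List.contains_eq_mem] using (Bool.not_eq_false _).mp hc
        rw [basesB_eq, List.mem_map] at hmem'
        obtain ⟨p, hp', hfst⟩ := hmem'
        have := huniq p hp' (hfst ▸ hprefix)
        have hlenb : p.1.length = b.length := by rw [this]
        rw [hfst] at hlenb
        simp at hlenb
        omega
      rw [hcont]
      simp only [Bool.false_eq_true, if_false]
      exact ih (pre ++ [c]) (by simpa using hpre) (by simp; omega)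

-- ===== VERDICT (by name: the statement is the Claim_ definition above) =====
theorem replace_by_base_spec : Claim_equal_replace_by_base := by
  intro word _
  show replace_by_base word = replace_by_base_alt word
  rw [replace_by_base, replace_by_base_alt]
  set L := PySem.Chars.lower word.toList with hL
  by_cases h : ∃ p ∈ basePairs, p.1 <+: L ∧ L ≠ p.1
  · obtain ⟨⟨b, r⟩, hmem, hp, hne⟩ := h
    have hlt : b.length < L.length := (guard_iff b L hp).mp hne
    have huniq := base_prefix_uniq L b r hmem hp
    rw [loopA_eq_some word L _ b r
        ((PySem.List.mem_sorted basePairs _ true _).mpr hmem) ⟨hp, hne⟩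
        (fun p hpm => huniq p ((PySem.List.mem_sorted basePairs _ true p).mp hpm)),
      loopB_eq_some word L b r hmem hp hlt huniq L []
        (by simp) (by have := basePairs_len_pos (b, r) hmem; simpa using this)]
  · push Not at h
    rw [loopA_eq_none word L _
        (fun p hpm hc => hc.2 (h p ((PySem.List.mem_sorted basePairs _ true p).mp hpm) hc.1)),
      loopB_eq_none word L
        (fun p hpm hc => ((guard_iff p.1 L hc.1).mpr hc.2) (h p hpm hc.1)) L [] (by simp)]
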